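-- pv_equiv track=rewrite | github.com/bl4ckh4nd/Gmaps-Scraper | src/utils/helpers.py | extract_place_id
-- ===== SOURCE A (Python) =====
-- def extract_place_id(url: str) -> str:
--     """Extract the unique place ID from a Google Maps URL.
--
--     Args:
--         url: Google Maps URL
--
--     Returns:
--         Place ID string, or the full URL if extraction fails
--     """
--     try:
--         # Look for the !19s pattern which is followed by the place ID
--         if '!19s' in url:
--             # Extract everything after !19s
--             place_id = url.split('!19s', 1)[1].split('!', 1)[0].split('?', 1)[0]
--             return place_id
--
--         # Alternative method - look for the data= pattern
--         elif 'data=' in url: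
--             parts = url.split('/')
--             # Find the part with business ID
--             for part in parts:
--                 if ':0x' in part:
--                     return part.split('?', 1)[0]
--
--         # If neither method works, use the full URL (less efficient)
--         return url
--     except Exception:
--         return url
-- ===== SOURCE B (Python) =====
-- def extract_place_id(url: str) -> str:
--     i = url.find('!19s')
--     if i != -1:
--         start = i + 4
--         end = len(url)
--         for stop in '!?':
--             j = url.find(stop, start)
--             if j != -1 and j < end:
--                 end = j
--         return url[start:end]
--     if 'data=' in url:
--         p = url.find(':0x')
--         if p != -1:
--             start = url.rfind('/', 0, p) + 1
--             end = url.find('/', p)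
--             if end == -1:
--                 end = len(url)
--             q = url.find('?', start, end)
--             if q != -1:
--                 end = q
--             return url[start:end]
--     return url
-- ===== Notes on version B (the rewrite author's own statement) =====
-- stated objective: alternative
-- what changed: A splits the URL into pieces (split chains and a loop over the '/'-parts list) and scans them; B never splits: it locates '!19s' or the first ':0x' by index with find/rfind, computes the cut boundaries arithmetically, and returns a single slice url[start:end].
import Mathlib
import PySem

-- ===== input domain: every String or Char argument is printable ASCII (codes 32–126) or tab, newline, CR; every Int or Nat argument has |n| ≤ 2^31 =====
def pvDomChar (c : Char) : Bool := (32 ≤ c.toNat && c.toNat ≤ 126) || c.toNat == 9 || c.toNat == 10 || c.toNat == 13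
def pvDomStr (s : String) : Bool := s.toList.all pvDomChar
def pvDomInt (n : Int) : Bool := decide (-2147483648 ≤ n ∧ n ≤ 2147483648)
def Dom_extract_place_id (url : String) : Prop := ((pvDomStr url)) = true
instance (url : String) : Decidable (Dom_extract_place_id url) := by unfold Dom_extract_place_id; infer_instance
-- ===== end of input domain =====

-- B never splits the URL: it locates '!19s' / the first ':0x' by index with find/rfind, computes the
-- cut boundaries arithmetically and returns one slice url[start:end] (alternative algorithm, same cost).


-- ===== PORT A =====
-- A's inner loop: 'for part in parts: if ":0x" in part: return part.split("?",1)[0]' with the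
-- fall-through 'return url'; the 'none' arms below are A's except-clause (an unreachable IndexError).
def pvAPartsLoop (url : String) : List (List Char) → String
  | [] => url
  | p :: rest =>
    if PySem.Chars.isIn ":0x".toList p then
      match PySem.List.pyGet? (PySem.Chars.splitOnMax p "?".toList 1) 0 with
      | some r => String.ofList r
      | none => url
    else pvAPartsLoop url rest

def extract_place_id (url : String) : String :=
  let cs := url.toList
  if PySem.Chars.isIn "!19s".toList cs then
    match PySem.List.pyGet? (PySem.Chars.splitOnMax cs "!19s".toList 1) 1 with
    | some after =>
      match PySem.List.pyGet? (PySem.Chars.splitOnMax after "!".toList 1) 0 with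
      | some s1 =>
        match PySem.List.pyGet? (PySem.Chars.splitOnMax s1 "?".toList 1) 0 with
        | some s2 => String.ofList s2
        | none => url
      | none => url
    | none => url
  else if PySem.Chars.isIn "data=".toList cs then
    pvAPartsLoop url (PySem.Chars.splitOn cs "/".toList)
  else url

-- ===== PORT B =====
-- Source B line for line: find/rfind give the cut indices, the result is a single slice url[start:end]
def extract_place_id_alt (url : String) : String :=
  let i := PySem.Str.find url "!19s"
  if i ≠ -1 then
    let start := i + 4
    -- for stop in '!?': j = url.find(stop, start); if j != -1 and j < end: end = j
    let e := ['!', '?'].foldl (fun e stop =>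
      let j := PySem.Str.findFrom url (String.ofList [stop]) start none
      if j ≠ -1 ∧ j < e then j else e) (PySem.Str.len url)
    PySem.Str.slice url (some start) (some e)
  else if PySem.Str.isIn "data=" url then
    let p := PySem.Str.find url ":0x"
    if p ≠ -1 then
      let start := PySem.Str.rfindFrom url "/" 0 (some p) + 1
      let e0 := PySem.Str.findFrom url "/" p none
      let e1 := if e0 = -1 then PySem.Str.len url else e0
      let q := PySem.Str.findFrom url "?" start (some e1)
      let e2 := if q ≠ -1 then q else e1
      PySem.Str.slice url (some start) (some e2)
    else url
  else url

-- ===== PRECONDITION & SPEC =====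
def Spec_extract_place_id (url : String) (out : String) : Prop := out = extract_place_id_alt url
instance (url : String) (out : String) : Decidable (Spec_extract_place_id url out) := by unfold Spec_extract_place_id; infer_instance

-- ===== CLAIM (what is proved, stated in full; the proofs are below) =====
def Claim_equal_extract_place_id : Prop := ∀ (url : String), Dom_extract_place_id url → Spec_extract_place_id url (extract_place_id url)

-- ===== LEMMAS AND PROOFS =====

-- ---------- generic find / split machinery (shared) ----------

theorem pv_find_go_ge (sub : List Char) : ∀ (l : List Char) (k : Nat),
    PySem.Chars.find.go sub l k = -1 ∨ (k:Int) ≤ PySem.Chars.find.go sub l k := by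
  intro l
  induction l with
  | nil =>
    intro k
    rw [PySem.Chars.find.go]
    by_cases h : sub.isEmpty <;> simp [h]
  | cons c t ih =>
    intro k
    rw [PySem.Chars.find.go]
    by_cases h : sub.isPrefixOf (c :: t)
    · simp [h]
    · simp only [h, Bool.false_eq_true, if_false]
      rcases ih (k+1) with h' | h'
      · left; exact h'
      · right
        refine le_trans ?_ h'
        push_cast; omega

theorem pv_find_go_shift (sub : List Char) : ∀ (l : List Char) (k : Nat),
    PySem.Chars.find.go sub l k =
      if PySem.Chars.find.go sub l 0 = -1 then -1 else PySem.Chars.find.go sub l 0 + k := by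
  intro l
  induction l with
  | nil =>
    intro k
    rw [PySem.Chars.find.go]
    conv_rhs => rw [PySem.Chars.find.go]
    by_cases h : sub.isEmpty <;> simp [h]
  | cons c t ih =>
    intro k
    rw [PySem.Chars.find.go]
    conv_rhs => rw [PySem.Chars.find.go]
    by_cases h : sub.isPrefixOf (c :: t)
    · simp [h]
    · simp only [h, Bool.false_eq_true, if_false]
      rw [ih (k+1), ih 1]
      rcases pv_find_go_ge sub t 0 with h' | h' <;> (push_cast; split_ifs <;> omega)

theorem pv_find_cons (sub : List Char) (c : Char) (t : List Char) :
    PySem.Chars.find (c :: t) sub =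
      if sub.isPrefixOf (c :: t) then 0
      else if PySem.Chars.find t sub = -1 then -1 else PySem.Chars.find t sub + 1 := by
  unfold PySem.Chars.find
  rw [PySem.Chars.find.go]
  by_cases h : sub.isPrefixOf (c :: t)
  · simp [h]
  · simp only [h, Bool.false_eq_true, if_false]
    rw [pv_find_go_shift]
    norm_num

theorem pv_find_nil (sub : List Char) (h : sub ≠ []) : PySem.Chars.find [] sub = -1 := by
  unfold PySem.Chars.find
  rw [PySem.Chars.find.go]
  simp [List.isEmpty_iff, h]

theorem pv_find_nonneg (s sub : List Char) (h : PySem.Chars.find s sub ≠ -1) :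
    0 ≤ PySem.Chars.find s sub := by
  have := PySem.Chars.neg_one_le_find s sub
  omega

theorem pv_go_zero (sep : List Char) : ∀ (fuel : Nat) (l cur : List Char) (acc : List (List Char)),
    PySem.Chars.splitOnMax.go sep fuel 0 l cur acc = acc.reverse ++ [cur.reverse ++ l] := by
  intro fuel l cur acc
  cases fuel with
  | zero => rw [PySem.Chars.splitOnMax.go.eq_def]; simp
  | succ n =>
    cases l with
    | nil => rw [PySem.Chars.splitOnMax.go.eq_def]; simp
    | cons c rest => rw [PySem.Chars.splitOnMax.go.eq_def]; simp

theorem pv_go_one (sep : List Char) (hsep : sep ≠ []) :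
    ∀ (fuel : Nat) (l cur : List Char) (acc : List (List Char)), l.length < fuel →
    PySem.Chars.splitOnMax.go sep fuel 1 l cur acc =
      if PySem.Chars.find l sep = -1 then acc.reverse ++ [cur.reverse ++ l]
      else acc.reverse ++ [cur.reverse ++ l.take (PySem.Chars.find l sep).toNat,
                           l.drop ((PySem.Chars.find l sep).toNat + sep.length)] := by
  intro fuel
  induction fuel with
  | zero => intro l cur acc h; omega
  | succ n ih =>
    intro l cur acc h
    cases l with
    | nil => rw [PySem.Chars.splitOnMax.go.eq_def]; simp [pv_find_nil sep hsep]
    | cons c rest =>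
      rw [PySem.Chars.splitOnMax.go.eq_def]
      simp only [Nat.succ_ne_zero, if_false]
      rw [pv_find_cons]
      by_cases hp : sep.isPrefixOf (c :: rest)
      · simp only [hp, if_true]
        rw [pv_go_zero]
        have h0 : ¬ ((0:Int) = -1) := by norm_num
        rw [if_neg h0]
        simp
      · simp only [hp, Bool.false_eq_true, if_false]
        rw [ih rest (c :: cur) acc (by simpa using Nat.lt_of_succ_lt_succ h)]
        by_cases h0 : PySem.Chars.find rest sep = -1
        · simp [h0]
        · have hge0 : 0 ≤ PySem.Chars.find rest sep := pv_find_nonneg rest sep h0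
          obtain ⟨m, hm⟩ := Int.eq_ofNat_of_zero_le hge0
          rw [hm]
          have hne : ¬ ((m:Int) + 1 = -1) := by omega
          have h0' : ¬ ((m:Int) = -1) := by omega
          simp only [if_neg h0', if_neg hne]
          have h1 : ((m:Int) + 1).toNat = m + 1 := by omega
          rw [h1, Int.toNat_natCast]
          simp [List.take_succ_cons, List.drop_succ_cons, Nat.add_right_comm]

theorem pv_splitOnMax_one (s sep : List Char) (hsep : sep ≠ []) :
    PySem.Chars.splitOnMax s sep 1 =
      if PySem.Chars.find s sep = -1 then [s]
      else [s.take (PySem.Chars.find s sep).toNat,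
            s.drop ((PySem.Chars.find s sep).toNat + sep.length)] := by
  unfold PySem.Chars.splitOnMax
  rw [if_neg (by norm_num : ¬ ((1:Int) < 0))]
  rw [show (1:Int).toNat = 1 from rfl]
  rw [pv_go_one sep hsep (s.length + 1) s [] [] (by omega)]
  split_ifs <;> simp

theorem pv_take_find (c : Char) : ∀ (s : List Char),
    (if PySem.Chars.find s [c] = -1 then s else s.take (PySem.Chars.find s [c]).toNat) =
      s.takeWhile (fun a => !(a == c)) := by
  intro s
  induction s with
  | nil => simp [pv_find_nil [c] (by simp)]
  | cons a t ih =>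
    rw [pv_find_cons]
    have hp : ([c].isPrefixOf (a :: t)) = (c == a) := by simp [List.isPrefixOf]
    rw [hp, List.takeWhile_cons]
    by_cases hac : a = c
    · have h1 : (c == a) = true := by simp [hac]
      have h2 : (!(a == c)) = false := by simp [hac]
      rw [h1, h2, if_pos rfl, if_neg (by norm_num : ¬ ((0:Int) = -1))]
      simp
    · have h1 : (c == a) = false := by simp [beq_eq_false_iff_ne]; exact fun h => hac h.symm
      have h2 : (!(a == c)) = true := by simp [hac]
      rw [h1, h2]
      by_cases h0 : PySem.Chars.find t [c] = -1
      · simp only [Bool.false_eq_true, if_false, if_pos h0]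
        rw [← ih, if_pos h0]
        simp
      · have hge0 : 0 ≤ PySem.Chars.find t [c] := pv_find_nonneg t [c] h0
        obtain ⟨m, hm⟩ := Int.eq_ofNat_of_zero_le hge0
        rw [hm]
        simp only [Bool.false_eq_true, if_false, if_neg (by omega : ¬ ((m:Int) = -1)),
          if_neg (by omega : ¬ ((m:Int) + 1 = -1))]
        have h3 : ((m:Int) + 1).toNat = m + 1 := by omega
        rw [h3, List.take_succ_cons, ← ih, if_neg h0, hm, Int.toNat_natCast]
        simp

theorem pv_split_head (s : List Char) (c : Char) :
    PySem.List.pyGet? (PySem.Chars.splitOnMax s [c] 1) 0 =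
      some (s.takeWhile (fun a => !(a == c))) := by
  rw [pv_splitOnMax_one s [c] (by simp), ← pv_take_find c s]
  split_ifs <;> simp [PySem.List.pyGet?, PySem.List.pyIdx?]

def pvSplitSlash (cur : List Char) : List Char → List (List Char)
  | [] => [cur.reverse]
  | c :: rest => if c = '/' then cur.reverse :: pvSplitSlash [] rest else pvSplitSlash (c :: cur) rest

theorem pv_splitOn_go_slash : ∀ (fuel : Nat) (l cur : List Char) (acc : List (List Char)),
    l.length < fuel →
    PySem.Chars.splitOn.go ['/'] fuel l cur acc = acc.reverse ++ pvSplitSlash cur l := by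
  intro fuel
  induction fuel with
  | zero => intro l cur acc h; omega
  | succ n ih =>
    intro l cur acc h
    cases l with
    | nil => rw [PySem.Chars.splitOn.go.eq_def]; simp [pvSplitSlash]
    | cons c rest =>
      rw [PySem.Chars.splitOn.go.eq_def]
      have hlt : rest.length < n := by simpa using Nat.lt_of_succ_lt_succ h
      by_cases hc : c = '/'
      · have hp : List.isPrefixOf ['/'] (c :: rest) = true := by simp [List.isPrefixOf, hc]
        simp only [hp, if_true]
        rw [show List.drop ['/'].length (c :: rest) = rest from rfl]
        rw [ih rest [] (cur.reverse :: acc) hlt]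
        simp [pvSplitSlash, hc]
      · have hp : List.isPrefixOf ['/'] (c :: rest) = false := by
          simp [List.isPrefixOf, beq_eq_false_iff_ne]; exact fun h' => hc h'.symm
        simp only [hp, Bool.false_eq_true, if_false]
        rw [ih rest (c :: cur) acc hlt]
        simp [pvSplitSlash, hc]

theorem pv_aloop_find? (url : String) : ∀ (ps : List (List Char)),
    pvAPartsLoop url ps =
      match ps.find? (fun p => PySem.Chars.isIn ":0x".toList p) with
      | some p => String.ofList (p.takeWhile (fun a => !(a == '?')))
      | none => url := by
  intro ps
  induction ps with
  | nil => simp [pvAPartsLoop]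
  | cons p rest ih =>
    rw [pvAPartsLoop]
    by_cases hp : PySem.Chars.isIn ":0x".toList p
    · rw [show "?".toList = ['?'] from rfl, pv_split_head, List.find?_cons, hp]
      simp
    · rw [Bool.not_eq_true] at hp
      rw [List.find?_cons, hp]
      simp only [Bool.false_eq_true, if_false]
      exact ih

-- ---------- small facts about find on single characters ----------

theorem pv_find_single_lt (t : List Char) (c : Char) (h : PySem.Chars.find t [c] ≠ -1) :
    (PySem.Chars.find t [c]).toNat < t.length := by
  have h0 := pv_find_nonneg t [c] h
  obtain ⟨hpre, -⟩ := PySem.Chars.find_spec h0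
  have h1 := hpre.length_le
  simp only [List.length_drop, List.length_cons, List.length_nil] at h1
  have h2 : (PySem.Chars.find t [c]) ≤ (t.length : Int) := PySem.Chars.find_le_length t [c]
  omega

theorem pv_find_none (z : List Char) (c : Char) (h : c ∉ z) :
    PySem.Chars.find z [c] = -1 := by
  rw [PySem.Chars.find_eq_neg_one_iff]
  rw [List.singleton_infix_iff]
  exact h

theorem pv_find_first (x y : List Char) (c : Char) (h : c ∉ x) :
    PySem.Chars.find (x ++ c :: y) [c] = (x.length : Int) := by
  induction x with
  | nil =>
    rw [List.nil_append, pv_find_cons]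
    have : [c].isPrefixOf (c :: y) = true := by simp [List.isPrefixOf]
    simp [this]
  | cons d x' ih =>
    have hdc : d ≠ c := fun hh => h (by simp [hh])
    have hcx : c ∉ x' := fun hh => h (by simp [hh])
    rw [List.cons_append, pv_find_cons]
    have hp : [c].isPrefixOf (d :: (x' ++ c :: y)) = false := by
      simp [List.isPrefixOf, beq_eq_false_iff_ne]
      exact fun hh => hdc hh.symm
    rw [hp]
    rw [ih hcx]
    simp

-- ---------- rfind characterization ----------

theorem pv_rfind_go_neg (l : List Char) (c : Char) :
    ∀ j, (∀ i ≤ j, ¬ [c] <+: l.drop i) → PySem.Chars.rfind.go l [c] j = -1 := by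
  intro j
  induction j with
  | zero =>
    intro hall
    rw [PySem.Chars.rfind.go]
    have := hall 0 (le_refl 0)
    simp only [List.drop_zero] at this
    rw [if_neg (by rw [List.isPrefixOf_iff_prefix]; exact this)]
  | succ j' ih =>
    intro hall
    rw [PySem.Chars.rfind.go]
    rw [if_neg (by rw [List.isPrefixOf_iff_prefix]; exact hall (j'+1) (le_refl _))]
    exact ih (fun i hi => hall i (by omega))

theorem pv_rfind_go_found (l : List Char) (c : Char) :
    ∀ j k, k ≤ j → [c] <+: l.drop k → (∀ i, k < i → i ≤ j → ¬ [c] <+: l.drop i) →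
      PySem.Chars.rfind.go l [c] j = (k : Int) := by
  intro j
  induction j with
  | zero =>
    intro k hk hpre hall
    interval_cases k
    rw [PySem.Chars.rfind.go]
    simp only [List.drop_zero] at hpre
    rw [if_pos (by rw [List.isPrefixOf_iff_prefix]; exact hpre)]
    simp
  | succ j' ih =>
    intro k hk hpre hall
    rw [PySem.Chars.rfind.go]
    by_cases hkj : k = j' + 1
    · subst hkj
      rw [if_pos (by rw [List.isPrefixOf_iff_prefix]; exact hpre)]
    · rw [if_neg (by rw [List.isPrefixOf_iff_prefix]; exact hall (j'+1) (by omega) (le_refl _))]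
      exact ih k (by omega) hpre (fun i h1 h2 => hall i h1 (by omega))

theorem pv_rfind_none (z : List Char) (c : Char) (h : c ∉ z) :
    PySem.Chars.rfind z [c] = -1 := by
  unfold PySem.Chars.rfind
  apply pv_rfind_go_neg
  intro i _ hpre
  rcases hpre with ⟨r, hr⟩
  have : c ∈ z.drop i := by rw [← hr]; simp
  exact h (List.mem_of_mem_drop this)

theorem pv_rfind_last (x y : List Char) (c : Char) (h : c ∉ y) :
    PySem.Chars.rfind (x ++ c :: y) [c] = (x.length : Int) := by
  unfold PySem.Chars.rfind
  apply pv_rfind_go_found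
  · simp only [List.length_append, List.length_cons]; omega
  · rw [List.drop_left]
    exact ⟨y, rfl⟩
  · intro i h1 _ hpre
    rcases hpre with ⟨r, hr⟩
    have hcm : c ∈ (x ++ c :: y).drop i := by rw [← hr]; simp
    rw [List.drop_append] at hcm
    have hx : (x.drop i) = ([] : List Char) := by
      apply List.drop_eq_nil_of_le; omega
    rw [hx, List.nil_append] at hcm
    have hi : i - x.length = (i - x.length - 1) + 1 := by omega
    rw [hi, List.drop_succ_cons] at hcm
    exact h (List.mem_of_mem_drop hcm)

-- ---------- the '!19s' branch: two nested takeWhile = one take at the minimal stop index ----------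

theorem pv_tw2 : ∀ t : List Char,
    (t.takeWhile (fun a => !(a == '!'))).takeWhile (fun a => !(a == '?')) =
      t.take (min (if PySem.Chars.find t ['!'] = -1 then t.length else (PySem.Chars.find t ['!']).toNat)
                  (if PySem.Chars.find t ['?'] = -1 then t.length else (PySem.Chars.find t ['?']).toNat)) := by
  intro t
  induction t with
  | nil => simp [pv_find_nil ['!'] (by simp), pv_find_nil ['?'] (by simp)]
  | cons c r ih =>
    rw [pv_find_cons ['!'], pv_find_cons ['?']]
    have hpb : (['!'].isPrefixOf (c :: r)) = ('!' == c) := by simp [List.isPrefixOf]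
    have hpq : (['?'].isPrefixOf (c :: r)) = ('?' == c) := by simp [List.isPrefixOf]
    rw [hpb, hpq]
    by_cases hb : c = '!'
    · subst hb
      simp
    · by_cases hq : c = '?'
      · subst hq
        simp
      · have h1 : ('!' == c) = false := by simp [beq_eq_false_iff_ne]; exact fun h => hb h.symm
        have h2 : ('?' == c) = false := by simp [beq_eq_false_iff_ne]; exact fun h => hq h.symm
        rw [h1, h2]
        simp only [Bool.false_eq_true, if_false]
        rw [List.takeWhile_cons, if_pos (by simp [hb]), List.takeWhile_cons, if_pos (by simp [hq])]
        rw [ih]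
        have key : ∀ (f : Int) (n : Nat), f = PySem.Chars.find r ['!'] ∨ f = PySem.Chars.find r ['?'] →
            (if (if f = -1 then -1 else f + 1) = -1 then n + 1 else ((if f = -1 then -1 else f + 1)).toNat)
              = (if f = -1 then n else f.toNat) + 1 := by
          intro f n hf
          have hge : f = -1 ∨ 0 ≤ f := by
            rcases hf with h | h <;> subst h
            · rcases eq_or_ne (PySem.Chars.find r ['!']) (-1) with h | h
              · exact Or.inl h
              · exact Or.inr (pv_find_nonneg r ['!'] h)
            · rcases eq_or_ne (PySem.Chars.find r ['?']) (-1) with h | h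
              · exact Or.inl h
              · exact Or.inr (pv_find_nonneg r ['?'] h)
          rcases hge with h | h
          · simp [h]
          · rw [if_neg (by omega : ¬ f = -1), if_neg (by omega : ¬ f + 1 = -1),
                if_neg (by omega : ¬ f = -1)]
            omega
        simp only [List.length_cons]
        rw [key _ r.length (Or.inl rfl), key _ r.length (Or.inr rfl)]
        rw [show ∀ x y : Nat, min (x + 1) (y + 1) = min x y + 1 from fun x y => by omega]
        simp [List.take_succ_cons]

-- ---------- the 'data=' branch: decomposition around the first ':0x' ----------

theorem pv_prefix_split (sub x y : List Char) (c : Char) (h : sub <+: x ++ c :: y) (hc : c ∉ sub) :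
    sub <+: x := by
  by_cases hlen : sub.length ≤ x.length
  · exact List.prefix_of_prefix_length_le h (x.prefix_append (c :: y)) hlen
  · exfalso
    obtain ⟨r, hr⟩ := h
    have h1 : sub[x.length]? = some c := by
      have e1 : (x ++ c :: y)[x.length]? = some c := by simp
      rw [← hr] at e1
      rwa [List.getElem?_append_left (by omega)] at e1
    exact hc (List.mem_of_getElem? h1)

theorem pv_straddle (sub : List Char) (c : Char) (hc : c ∉ sub) :
    ∀ x y : List Char, sub <:+: x ++ c :: y → sub <:+: x ∨ sub <:+: y := by
  intro x
  induction x with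
  | nil =>
    intro y h
    rw [List.nil_append, List.infix_cons_iff] at h
    rcases h with h | h
    · rcases sub with _ | ⟨d, rest⟩
      · exact Or.inl List.nil_infix
      · obtain ⟨r, hr⟩ := h
        simp only [List.cons_append, List.cons.injEq] at hr
        exact absurd (hr.1 ▸ List.mem_cons_self) hc
    · exact Or.inr h
  | cons d x' ih =>
    intro y h
    rw [List.cons_append, List.infix_cons_iff] at h
    rcases h with h | h
    · exact Or.inl ((pv_prefix_split sub (d :: x') y c (by simpa using h) hc).isInfix)
    · rcases ih y h with h' | h'
      · exact Or.inl (List.infix_cons h')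
      · exact Or.inr h' 

theorem pv_first_slash (l : List Char) (h : '/' ∈ l) :
    ∃ x z, l = x ++ '/' :: z ∧ '/' ∉ x := by
  have hd : l.dropWhile (fun a => !(a == '/')) ≠ [] := by
    intro hh
    rw [List.dropWhile_eq_nil_iff] at hh
    simpa using hh '/' h
  have hh := List.head_dropWhile_not (fun a => !(a == '/')) hd
  have hhead : (l.dropWhile (fun a => !(a == '/'))).head hd = '/' := by
    simpa using hh
  refine ⟨l.takeWhile (fun a => !(a == '/')), (l.dropWhile (fun a => !(a == '/'))).tail, ?_, ?_⟩
  · have hsp : l.dropWhile (fun a => !(a == '/')) = '/' :: (l.dropWhile (fun a => !(a == '/'))).tail := by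
      conv_lhs => rw [← List.cons_head_tail hd]
      rw [hhead]
    conv_lhs => rw [← List.takeWhile_append_dropWhile (p := fun a => !(a == '/')) (l := l), hsp]
  · intro hmem
    simpa using List.mem_takeWhile_imp hmem

theorem pv_decomp : ∀ (n : Nat) (l : List Char), l.length ≤ n → ":0x".toList <:+: l →
    ∃ a seg b, l = a ++ seg ++ b ∧ (a = [] ∨ ∃ a', a = a' ++ ['/']) ∧ '/' ∉ seg ∧
      (b = [] ∨ ∃ b', b = '/' :: b') ∧ ":0x".toList <:+: seg ∧ ¬ ":0x".toList <:+: a := by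
  intro n
  induction n with
  | zero =>
    intro l hl hin
    have : l = [] := List.eq_nil_of_length_eq_zero (by omega)
    subst this
    exact absurd (List.eq_nil_of_infix_nil hin) (by decide)
  | succ n ih =>
    intro l hl hin
    by_cases hsl : '/' ∈ l
    · obtain ⟨x, z, rfl, hx⟩ := pv_first_slash l hsl
      by_cases hx0 : ":0x".toList <:+: x
      · exact ⟨[], x, '/' :: z, by simp, Or.inl rfl, hx, Or.inr ⟨z, rfl⟩, hx0,
          by intro hbad; exact absurd (List.eq_nil_of_infix_nil hbad) (by decide)⟩
      · have hz : ":0x".toList <:+: z := by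
          rcases pv_straddle ":0x".toList '/' (by decide) x z hin with h | h
          · exact absurd h hx0
          · exact h
        have hzl : z.length ≤ n := by
          have := hl
          simp only [List.length_append, List.length_cons] at this
          omega
        obtain ⟨a, seg, b, rfl, ha, hs, hb, hseg, hna⟩ := ih z hzl hz
        refine ⟨x ++ '/' :: a, seg, b, by simp, ?_, hs, hb, hseg, ?_⟩
        · rcases ha with rfl | ⟨a', rfl⟩
          · exact Or.inr ⟨x, by simp⟩
          · exact Or.inr ⟨x ++ '/' :: a', by simp⟩
        · intro hbad
          rcases pv_straddle ":0x".toList '/' (by decide) x a hbad with h | h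
          · exact hx0 h
          · exact hna h
    · exact ⟨[], l, [], by simp, Or.inl rfl, hsl, Or.inl rfl, hin,
        by intro hbad; exact absurd (List.eq_nil_of_infix_nil hbad) (by decide)⟩

theorem pv_splitSlash_no_slash (l : List Char) (cur : List Char) (h : '/' ∉ l) :
    pvSplitSlash cur l = [cur.reverse ++ l] := by
  induction l generalizing cur with
  | nil => simp [pvSplitSlash]
  | cons c rest ih =>
    rw [pvSplitSlash]
    have hc : c ≠ '/' := fun hh => h (by simp [hh])
    rw [if_neg (by exact fun hh => hc hh)]
    rw [ih (c :: cur) (fun hh => h (List.mem_cons_of_mem c hh))]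
    simp

theorem pv_splitSlash_append (x z : List Char) (cur : List Char) (h : '/' ∉ x) :
    pvSplitSlash cur (x ++ '/' :: z) = (cur.reverse ++ x) :: pvSplitSlash [] z := by
  induction x generalizing cur with
  | nil =>
    rw [List.nil_append, pvSplitSlash, if_pos rfl]
    simp
  | cons d x' ih =>
    have hd : d ≠ '/' := fun hh => h (by simp [hh])
    rw [List.cons_append, pvSplitSlash, if_neg (by exact fun hh => hd hh)]
    rw [ih (d :: cur) (fun hh => h (List.mem_cons_of_mem d hh))]
    simp

theorem pv_seg_infix : ∀ (l cur p : List Char), p ∈ pvSplitSlash cur l → p <:+: (cur.reverse ++ l) := by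
  intro l
  induction l with
  | nil =>
    intro cur p hp
    rw [pvSplitSlash] at hp
    simp only [List.mem_singleton] at hp
    subst hp
    simp
  | cons c rest ih =>
    intro cur p hp
    rw [pvSplitSlash] at hp
    by_cases hc : c = '/'
    · rw [if_pos hc] at hp
      rcases List.mem_cons.mp hp with h | h
      · subst h
        exact (List.prefix_append cur.reverse (c :: rest)).isInfix
      · have := ih [] p h
        simp only [List.reverse_nil, List.nil_append] at this
        refine this.trans ?_
        exact ((List.suffix_cons c rest).trans (List.suffix_append cur.reverse (c :: rest))).isInfix
    · rw [if_neg hc] at hp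
      have := ih (c :: cur) p hp
      simp only [List.reverse_cons] at this
      simpa using this

theorem pv_findq : ∀ (n : Nat) (a seg b : List Char), a.length ≤ n →
    (a = [] ∨ ∃ a', a = a' ++ ['/']) → '/' ∉ seg → (b = [] ∨ ∃ b', b = '/' :: b') →
    ":0x".toList <:+: seg → ¬ ":0x".toList <:+: a →
    (pvSplitSlash [] (a ++ seg ++ b)).find? (fun p => PySem.Chars.isIn ":0x".toList p) = some seg := by
  intro n
  induction n with
  | zero =>
    intro a seg b ha0 ha hs hb hseg hna
    have : a = [] := List.eq_nil_of_length_eq_zero (by omega)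
    subst this
    have htrue : PySem.Chars.isIn [':', '0', 'x'] seg = true :=
      (PySem.Chars.isIn_iff_infix ":0x".toList seg).mpr hseg
    rcases hb with rfl | ⟨b', rfl⟩
    · rw [List.nil_append, List.append_nil, pv_splitSlash_no_slash seg [] hs]
      simp [htrue]
    · rw [List.nil_append, pv_splitSlash_append seg b' [] hs]
      simp [htrue]
  | succ n ih =>
    intro a seg b ha0 ha hs hb hseg hna
    rcases ha with rfl | ⟨a', rfl⟩
    · exact ih [] seg b (by simp) (Or.inl rfl) hs hb hseg hna
    · have hsl : '/' ∈ a' ++ ['/'] := by simp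
      obtain ⟨x, z, hxz, hx⟩ := pv_first_slash (a' ++ ['/']) hsl
      rw [hxz]
      have hassoc : (x ++ '/' :: z) ++ seg ++ b = x ++ '/' :: (z ++ seg ++ b) := by simp
      rw [hassoc, pv_splitSlash_append x (z ++ seg ++ b) [] hx]
      simp only [List.reverse_nil, List.nil_append]
      rw [List.find?_cons]
      have hxin : PySem.Chars.isIn ":0x".toList x = false := by
        rw [PySem.Chars.isIn_eq_false_iff]
        intro hbad
        exact hna (hxz ▸ hbad.trans (List.prefix_append x ('/' :: z)).isInfix)
      rw [hxin]
      simp only []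
      have hz : z = [] ∨ ∃ z', z = z' ++ ['/'] := by
        rcases List.eq_nil_or_concat z with rfl | ⟨ys, c, rfl⟩
        · exact Or.inl rfl
        · right
          have h1 : a' ++ ['/'] = (x ++ '/' :: ys) ++ [c] := by
            rw [hxz]; simp
          have h2 := congrArg List.getLast? h1
          rw [List.getLast?_concat, List.getLast?_concat] at h2
          obtain rfl : c = '/' := (Option.some.inj h2).symm
          exact ⟨ys, by simp⟩
      have hzlen : z.length ≤ n := by
        have := ha0
        have h4 : (a' ++ ['/']).length = x.length + 1 + z.length := by
          rw [hxz]; simp; omega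
        simp only [List.length_append, List.length_cons] at this h4 ⊢
        omega
      have hnz : ¬ ":0x".toList <:+: z := by
        intro hbad
        apply hna
        rw [hxz]
        exact hbad.trans ((List.suffix_cons '/' z).trans (List.suffix_append x _)).isInfix
      exact ih z seg b hzlen hz hs hb hseg hnz

theorem pv_p_bounds (a seg b : List Char)
    (ha : a = [] ∨ ∃ a', a = a' ++ ['/']) (_hs : '/' ∉ seg)
    (hseg : ":0x".toList <:+: seg) (hna : ¬ ":0x".toList <:+: a) :
    0 ≤ PySem.Chars.find (a ++ seg ++ b) ":0x".toList ∧
    a.length ≤ (PySem.Chars.find (a ++ seg ++ b) ":0x".toList).toNat ∧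
    (PySem.Chars.find (a ++ seg ++ b) ":0x".toList).toNat + 3 ≤ a.length + seg.length := by
  have hin : ":0x".toList <:+: a ++ seg ++ b := by
    refine hseg.trans ⟨a, b, by simp⟩
  have h0 : 0 ≤ PySem.Chars.find (a ++ seg ++ b) ":0x".toList :=
    (PySem.Chars.find_nonneg_iff _ _).mpr hin
  obtain ⟨hpre, hmin⟩ := PySem.Chars.find_spec h0
  set l := a ++ seg ++ b with hl
  set p := (PySem.Chars.find l ":0x".toList).toNat with hp
  -- the within-seg occurrence
  have hq0 : 0 ≤ PySem.Chars.find seg ":0x".toList := (PySem.Chars.find_nonneg_iff _ _).mpr hseg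
  obtain ⟨hqpre, -⟩ := PySem.Chars.find_spec hq0
  set q := (PySem.Chars.find seg ":0x".toList).toNat with hq
  have hq3 : q + 3 ≤ seg.length := by
    have := hqpre.length_le
    simp only [List.length_drop] at this
    have hqle : (PySem.Chars.find seg ":0x".toList) ≤ (seg.length : Int) :=
      PySem.Chars.find_le_length seg ":0x".toList
    have : (3 : Nat) ≤ seg.length - q := by simpa using this
    omega
  have hdropq : l.drop (a.length + q) = seg.drop q ++ b := by
    rw [hl, List.append_assoc, List.drop_append, List.drop_eq_nil_of_le (by omega : a.length ≤ a.length + q)]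
    rw [List.nil_append, show a.length + q - a.length = q from by omega, List.drop_append]
    rw [show q - seg.length = 0 from by omega, List.drop_zero]
  have hocc : ":0x".toList <+: l.drop (a.length + q) := by
    rw [hdropq]
    exact hqpre.trans (List.prefix_append _ b)
  have hub : p ≤ a.length + q := by
    by_contra hcon
    exact hmin (a.length + q) (by omega) hocc
  refine ⟨h0, ?_, by omega⟩
  -- lower bound
  rcases ha with rfl | ⟨a'', rfl⟩
  · simp
  · by_contra hcon
    have hpa : p ≤ a''.length := by
      simp only [not_le, List.length_append, List.length_cons, List.length_nil] at hcon
      omega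
    have hl2 : l = a'' ++ '/' :: (seg ++ b) := by rw [hl]; simp
    by_cases hfar : p + 3 ≤ a''.length
    · -- the occurrence fits inside a''
      have hpre2 : a''.drop p <+: l.drop p := by
        have : a'' <+: l := by rw [hl2]; exact ⟨'/' :: (seg ++ b), rfl⟩
        exact this.drop p
      have hsub : ":0x".toList <+: a''.drop p := by
        refine List.prefix_of_prefix_length_le hpre hpre2 ?_
        simp only [List.length_drop]
        have : (":0x".toList).length = 3 := by decide
        omega
      have : ":0x".toList <:+: a'' ++ ['/'] := by
        refine (hsub.isInfix.trans (List.drop_suffix p a'').isInfix).trans ?_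
        exact ⟨[], ['/'], by simp⟩
      exact hna this
    · -- the occurrence would cover the '/' at index a''.length
      obtain ⟨r, hr⟩ := hpre
      have hidx : (":0x".toList)[a''.length - p]? = some '/' := by
        have e1 : l[a''.length]? = some '/' := by rw [hl2]; simp
        have e2 : (l.drop p)[a''.length - p]? = some '/' := by
          rw [List.getElem?_drop, show p + (a''.length - p) = a''.length from by omega]
          exact e1
        rw [← hr] at e2
        rwa [List.getElem?_append_left (by simp; omega)] at e2
      have : '/' ∈ ":0x".toList := List.mem_of_getElem? hidx
      exact absurd this (by decide)

theorem pv_take_mid (a seg b : List Char) (k : Nat) (h1 : a.length ≤ k) (_h2 : k ≤ a.length + seg.length) :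
    List.take k (a ++ seg ++ b) = a ++ seg.take (k - a.length) := by
  rw [List.append_assoc, List.take_append, List.take_of_length_le h1, List.take_append]
  rw [show k - a.length - seg.length = 0 from by omega, List.take_zero, List.append_nil]

theorem pv_drop_mid (a seg b : List Char) (k : Nat) (h1 : a.length ≤ k) (h2 : k ≤ a.length + seg.length) :
    List.drop k (a ++ seg ++ b) = seg.drop (k - a.length) ++ b := by
  rw [List.append_assoc, List.drop_append, List.drop_eq_nil_of_le h1, List.nil_append, List.drop_append]
  rw [show k - a.length - seg.length = 0 from by omega, List.drop_zero]

theorem pv_rfindFrom_eval (a seg b : List Char) (k : Nat)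
    (ha : a = [] ∨ ∃ a', a = a' ++ ['/']) (hs : '/' ∉ seg)
    (h1 : a.length ≤ k) (h2 : k ≤ a.length + seg.length) :
    PySem.Chars.rfindFrom (a ++ seg ++ b) ['/'] 0 (some (k : Int)) = (a.length : Int) - 1 := by
  have hlen : k ≤ (a ++ seg ++ b).length := by
    simp only [List.length_append]; omega
  unfold PySem.Chars.rfindFrom
  dsimp only
  rw [if_neg (by simp only [List.length_append]; omega : ¬ ((a ++ seg ++ b).length : Int) < (k : Int)),
      if_neg (by omega : ¬ (k : Int) < 0)]
  rw [if_neg (by norm_num : ¬ (0:Int) < 0)]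
  rw [if_neg (by omega : ¬ (k : Int) < 0)]
  rw [Int.toNat_natCast, Int.toNat_zero, List.drop_zero]
  rw [pv_take_mid a seg b k h1 h2]
  rcases ha with rfl | ⟨a'', rfl⟩
  · rw [pv_rfind_none _ '/' (by
      intro hm
      simp only [List.nil_append] at hm
      exact hs (List.mem_of_mem_take hm))]
    simp
  · have hre : (a'' ++ ['/']) ++ seg.take (k - (a'' ++ ['/']).length) =
        a'' ++ '/' :: seg.take (k - (a'' ++ ['/']).length) := by simp
    rw [hre, pv_rfind_last a'' _ '/' (fun hm => hs (List.mem_of_mem_take hm))]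
    rw [if_neg (by omega : ¬ (a''.length : Int) = -1)]
    simp only [List.length_append, List.length_cons, List.length_nil]
    push_cast
    ring

theorem pv_findFrom_slash_eval (a seg b : List Char) (k : Nat)
    (hs : '/' ∉ seg) (hb : b = [] ∨ ∃ b', b = '/' :: b')
    (h1 : a.length ≤ k) (h2 : k ≤ a.length + seg.length) :
    PySem.Chars.findFrom (a ++ seg ++ b) ['/'] (k : Int) none =
      if b = [] then -1 else ((a.length + seg.length : Nat) : Int) := by
  have hlen : k ≤ (a ++ seg ++ b).length := by
    simp only [List.length_append]; omega
  rw [PySem.Chars.findFrom_natCast _ _ k hlen]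
  rw [pv_drop_mid a seg b k h1 h2]
  rcases hb with rfl | ⟨b', rfl⟩
  · rw [List.append_nil, pv_find_none _ '/' (fun hm => hs (List.mem_of_mem_drop hm))]
    simp
  · rw [pv_find_first _ b' '/' (fun hm => hs (List.mem_of_mem_drop hm))]
    rw [if_neg (by omega : ¬ ((List.drop (k - a.length) seg).length : Int) = -1)]
    rw [if_neg (List.cons_ne_nil '/' b')]
    simp only [List.length_drop]
    push_cast
    omega

theorem pv_findq_eval (a seg b : List Char) :
    PySem.Chars.findFrom (a ++ seg ++ b) ['?'] (a.length : Int) (some ((a.length + seg.length : Nat) : Int)) =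
      if PySem.Chars.find seg ['?'] = -1 then -1 else (a.length : Int) + PySem.Chars.find seg ['?'] := by
  unfold PySem.Chars.findFrom
  dsimp only
  have hlen : (a ++ seg ++ b).length = a.length + seg.length + b.length := by simp; omega
  rw [if_neg (by push_cast; omega : ¬ ((a ++ seg ++ b).length : Int) < ((a.length + seg.length : Nat) : Int))]
  rw [if_neg (by omega : ¬ ((a.length + seg.length : Nat) : Int) < 0)]
  rw [if_neg (by omega : ¬ (a.length : Int) < 0)]
  rw [if_neg (by push_cast; omega : ¬ ((a.length + seg.length : Nat) : Int) < (a.length : Int))]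
  rw [Int.toNat_natCast, Int.toNat_natCast]
  rw [pv_take_mid a seg b (a.length + seg.length) (by omega) (by omega)]
  rw [show a.length + seg.length - a.length = seg.length from by omega, List.take_length]
  rw [List.drop_left]

-- ---------- main equality ----------

theorem main_eq (url : String) : extract_place_id url = extract_place_id_alt url := by
  unfold extract_place_id extract_place_id_alt
  simp only [PySem.Str.find_eq, PySem.Str.findFrom_eq, PySem.Str.rfindFrom_eq, PySem.Str.isIn_eq,
    PySem.Str.len_eq, PySem.Str.slice, PySem.Chars.slice_eq_listSlice, String.toList_ofList]
  simp only [show ("/" : String).toList = ['/'] from rfl, show ("?" : String).toList = ['?'] from rfl,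
    show ("!" : String).toList = ['!'] from rfl]
  set cs := url.toList with hcs
  by_cases h19 : PySem.Chars.find cs "!19s".toList = -1
  · -- '!19s' not found
    have hf : PySem.Chars.isIn "!19s".toList cs = false :=
      (PySem.Chars.isIn_eq_false_iff _ _).mpr (by rwa [← PySem.Chars.find_eq_neg_one_iff])
    rw [hf, if_neg (by simp), if_neg (not_not_intro h19)]
    by_cases hd : PySem.Chars.isIn "data=".toList cs = true
    · rw [if_pos hd, if_pos hd]
      unfold PySem.Chars.splitOn
      rw [pv_splitOn_go_slash (cs.length + 1) cs [] [] (by omega)]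
      simp only [List.reverse_nil, List.nil_append]
      rw [pv_aloop_find? url (pvSplitSlash [] cs)]
      by_cases hp : PySem.Chars.find cs ":0x".toList = -1
      · -- no ':0x' anywhere: both fall through to url
        rw [if_neg (not_not_intro hp)]
        have hnone : (pvSplitSlash [] cs).find? (fun p => PySem.Chars.isIn ":0x".toList p) = none := by
          rw [List.find?_eq_none]
          intro x hx htrue
          have h1 : x <:+: cs := by
            have := pv_seg_infix cs [] x hx
            simpa using this
          have h2 : ":0x".toList <:+: cs :=
            ((PySem.Chars.isIn_iff_infix _ _).mp htrue).trans h1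
          rw [PySem.Chars.find_eq_neg_one_iff] at hp
          exact hp h2
        rw [hnone]
      · -- ':0x' present: decompose around its first occurrence
        rw [if_pos hp]
        have h0 : 0 ≤ PySem.Chars.find cs ":0x".toList := pv_find_nonneg cs ":0x".toList hp
        have hinf : ":0x".toList <:+: cs := by rwa [← PySem.Chars.find_ne_neg_one_iff]
        obtain ⟨a, seg, b, hdec, ha, hs, hb, hseg, hna⟩ := pv_decomp cs.length cs le_rfl hinf
        obtain ⟨-, hlb, hub⟩ := pv_p_bounds a seg b ha hs hseg hna
        rw [← hdec] at hlb hub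
        obtain ⟨k', hk⟩ := Int.eq_ofNat_of_zero_le h0
        rw [hk] at hlb hub
        rw [Int.toNat_natCast] at hlb hub
        rw [hdec, pv_findq a.length a seg b le_rfl ha hs hb hseg hna, ← hdec]
        dsimp only
        rw [hk]
        rw [hdec, pv_rfindFrom_eval a seg b k' ha hs hlb (by omega), ← hdec]
        rw [hdec, pv_findFrom_slash_eval a seg b k' hs hb hlb (by omega), ← hdec]
        have hstart : (a.length : Int) - 1 + 1 = (a.length : Int) := by ring
        rw [hstart]
        have hcl : cs.length = a.length + seg.length + b.length := by rw [hdec]; simp; omega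
        have he1 : (if (if b = [] then (-1 : Int) else ((a.length + seg.length : Nat) : Int)) = -1
            then (cs.length : Int) else (if b = [] then (-1 : Int) else ((a.length + seg.length : Nat) : Int)))
            = ((a.length + seg.length : Nat) : Int) := by
          rcases hb with rfl | ⟨b', rfl⟩
          · rw [if_pos rfl, if_pos rfl]
            rw [hcl]
            push_cast
            simp
          · rw [if_neg (List.cons_ne_nil '/' b'), if_neg (by omega : ¬ ((a.length + seg.length : Nat) : Int) = -1)]
        rw [he1]
        rw [hdec, pv_findq_eval a seg b, ← hdec]
        by_cases hq : PySem.Chars.find seg ['?'] = -1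
        · rw [if_pos hq]
          rw [if_neg (by omega : ¬ ((-1 : Int) ≠ -1))]
          have htw : seg.takeWhile (fun a => !(a == '?')) = seg := by
            rw [List.takeWhile_eq_self_iff]
            intro x hx
            rw [PySem.Chars.find_eq_neg_one_iff, List.singleton_infix_iff] at hq
            simp only [Bool.not_eq_eq_eq_not, Bool.not_true, beq_eq_false_iff_ne]
            exact fun hxq => hq (hxq ▸ hx)
          rw [htw]
          have hcast : ((a.length + seg.length : Nat) : Int) = (a.length : Int) + (seg.length : Int) := by
            push_cast; ring
          rw [hcast, PySem.List.slice_natCast_add]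
          rw [hdec, List.append_assoc, List.drop_left, List.take_left]
        · rw [if_neg hq]
          obtain ⟨m, hm⟩ := Int.eq_ofNat_of_zero_le (pv_find_nonneg seg ['?'] hq)
          have hmlt : m < seg.length := by
            have := pv_find_single_lt seg '?' hq
            rwa [hm, Int.toNat_natCast] at this
          rw [if_pos (by rw [hm]; omega : (a.length : Int) + PySem.Chars.find seg ['?'] ≠ -1)]
          rw [hm, PySem.List.slice_natCast_add]
          rw [hdec, List.append_assoc, List.drop_left, List.take_append]
          rw [show m - seg.length = 0 from by omega, List.take_zero, List.append_nil]
          have htw : seg.takeWhile (fun a => !(a == '?')) = seg.take m := by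
            rw [← pv_take_find '?' seg, if_neg hq, hm, Int.toNat_natCast]
          rw [htw]
    · rw [if_neg hd, if_neg hd]
  · -- '!19s' found at k'
    have hf : PySem.Chars.isIn "!19s".toList cs = true := by
      rw [PySem.Chars.isIn_iff_infix, ← PySem.Chars.find_ne_neg_one_iff]
      exact h19
    rw [hf, if_pos rfl, if_pos h19]
    have h0 : 0 ≤ PySem.Chars.find cs "!19s".toList := pv_find_nonneg cs "!19s".toList h19
    obtain ⟨k', hk⟩ := Int.eq_ofNat_of_zero_le h0
    have hkl : k' + 4 ≤ cs.length := by
      obtain ⟨hpre, -⟩ := PySem.Chars.find_spec h0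
      have h1 := hpre.length_le
      rw [hk, Int.toNat_natCast] at h1
      simp only [List.length_drop] at h1
      have : ("!19s".toList).length = 4 := by decide
      omega
    -- A-side: reduce the split chain to two nested takeWhile over the tail after the marker
    rw [pv_splitOnMax_one cs "!19s".toList (by decide), if_neg h19]
    rw [show PySem.List.pyGet? [cs.take (PySem.Chars.find cs "!19s".toList).toNat,
        cs.drop ((PySem.Chars.find cs "!19s".toList).toNat + ("!19s".toList).length)] 1
      = some (cs.drop ((PySem.Chars.find cs "!19s".toList).toNat + ("!19s".toList).length))
      from by simp [PySem.List.pyGet?, PySem.List.pyIdx?]]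
    dsimp only
    rw [pv_split_head]
    dsimp only
    rw [pv_split_head]
    dsimp only
    rw [hk, Int.toNat_natCast]
    rw [show ("!19s".toList).length = 4 from by decide]
    set t := cs.drop (k' + 4) with ht
    -- B-side: evaluate the two findFrom steps of the fold
    simp only [List.foldl_cons, List.foldl_nil]
    have hc4 : ((k' : Int)) + 4 = (((k' + 4 : Nat)) : Int) := by push_cast; ring
    have hfc : ∀ c : Char, PySem.Chars.findFrom cs [c] ((k' : Int) + 4) none =
        if PySem.Chars.find t [c] = -1 then -1 else (((k' + 4 : Nat)) : Int) + PySem.Chars.find t [c] := by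
      intro c
      rw [hc4, PySem.Chars.findFrom_natCast cs [c] (k' + 4) hkl, ht]
    have hlen_t : cs.length = (k' + 4) + t.length := by
      rw [ht]; simp only [List.length_drop]; omega
    rw [pv_tw2 t]
    rw [hfc '!', hfc '?']
    by_cases hA : PySem.Chars.find t ['!'] = -1 <;> by_cases hB : PySem.Chars.find t ['?'] = -1
    · simp only [if_pos hA, if_pos hB, min_self]
      rw [if_neg (by norm_num : ¬ ((-1:Int) ≠ -1 ∧ (-1:Int) < (cs.length : Int)))]
      rw [if_neg (by norm_num : ¬ ((-1:Int) ≠ -1 ∧ (-1:Int) < (cs.length : Int)))]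
      rw [show (cs.length : Int) = (((k' + 4 : Nat)) : Int) + ((t.length : Nat) : Int) from by
        rw [hlen_t]; push_cast; ring]
      rw [hc4, PySem.List.slice_natCast_add, ← ht, List.take_length]
    · obtain ⟨m, hm⟩ := Int.eq_ofNat_of_zero_le (pv_find_nonneg t ['?'] hB)
      have hmlt : m < t.length := by
        have := pv_find_single_lt t '?' hB
        rwa [hm, Int.toNat_natCast] at this
      simp only [if_pos hA, if_neg hB]
      rw [hm, Int.toNat_natCast]
      rw [if_neg (by norm_num : ¬ ((-1:Int) ≠ -1 ∧ (-1:Int) < (cs.length : Int)))]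
      rw [if_pos (show (((k' + 4 : Nat)) : Int) + (m : Int) ≠ -1 ∧
            (((k' + 4 : Nat)) : Int) + (m : Int) < (cs.length : Int) from
        ⟨by omega, by rw [hlen_t]; push_cast; omega⟩)]
      rw [show min t.length m = m from by omega]
      rw [hc4, PySem.List.slice_natCast_add, ← ht]
    · obtain ⟨m, hm⟩ := Int.eq_ofNat_of_zero_le (pv_find_nonneg t ['!'] hA)
      have hmlt : m < t.length := by
        have := pv_find_single_lt t '!' hA
        rwa [hm, Int.toNat_natCast] at this
      simp only [if_neg hA, if_pos hB]
      rw [hm, Int.toNat_natCast]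
      rw [if_pos (show (((k' + 4 : Nat)) : Int) + (m : Int) ≠ -1 ∧
            (((k' + 4 : Nat)) : Int) + (m : Int) < (cs.length : Int) from
        ⟨by omega, by rw [hlen_t]; push_cast; omega⟩)]
      rw [if_neg (by norm_num : ¬ ((-1:Int) ≠ -1 ∧
            (-1:Int) < (((k' + 4 : Nat)) : Int) + (m : Int)))]
      rw [show min m t.length = m from by omega]
      rw [hc4, PySem.List.slice_natCast_add, ← ht]
    · obtain ⟨m1, hm1⟩ := Int.eq_ofNat_of_zero_le (pv_find_nonneg t ['!'] hA)
      obtain ⟨m2, hm2⟩ := Int.eq_ofNat_of_zero_le (pv_find_nonneg t ['?'] hB)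
      have hm1lt : m1 < t.length := by
        have := pv_find_single_lt t '!' hA
        rwa [hm1, Int.toNat_natCast] at this
      have hm2lt : m2 < t.length := by
        have := pv_find_single_lt t '?' hB
        rwa [hm2, Int.toNat_natCast] at this
      simp only [if_neg hA, if_neg hB]
      rw [hm1, hm2, Int.toNat_natCast, Int.toNat_natCast]
      rw [if_pos (show (((k' + 4 : Nat)) : Int) + (m1 : Int) ≠ -1 ∧
            (((k' + 4 : Nat)) : Int) + (m1 : Int) < (cs.length : Int) from
        ⟨by omega, by rw [hlen_t]; push_cast; omega⟩)]
      by_cases hcmp : m2 < m1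
      · rw [if_pos (show (((k' + 4 : Nat)) : Int) + (m2 : Int) ≠ -1 ∧
              (((k' + 4 : Nat)) : Int) + (m2 : Int) < (((k' + 4 : Nat)) : Int) + (m1 : Int) from
          ⟨by omega, by push_cast; omega⟩)]
        rw [show min m1 m2 = m2 from by omega]
        rw [hc4, PySem.List.slice_natCast_add, ← ht]
      · rw [if_neg (show ¬ ((((k' + 4 : Nat)) : Int) + (m2 : Int) ≠ -1 ∧
              (((k' + 4 : Nat)) : Int) + (m2 : Int) < (((k' + 4 : Nat)) : Int) + (m1 : Int)) from by
          push_cast; omega)]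
        rw [show min m1 m2 = m1 from by omega]
        rw [hc4, PySem.List.slice_natCast_add, ← ht]

-- ===== VERDICT (by name: the statement is the Claim_ definition above) =====
theorem extract_place_id_spec : Claim_equal_extract_place_id := by
  unfold Claim_equal_extract_place_id
  intro url _
  unfold Spec_extract_place_id
  exact main_eq url
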